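-- pv_equiv track=rewrite | github.com/AxelBlazerGit/LeetCode | medium/2375. Construct Smallest Number From DI String.py | smallestNumber
-- ===== SOURCE A (Python) =====
-- def smallestNumber(pattern: str) -> str:
--     stk=[]
--     num=1
--     sn=['']*(len(pattern)+1)
--
--     for idx,ch in enumerate(pattern):
--         stk.append(idx)
--         if ch=='I':
--             while stk:
--                 sn[stk.pop()]=str(num)
--                 num+=1
--
--     stk.append(len(pattern))
--     while stk:
--         sn[stk.pop()]=str(num)
--         num+=1
--
--     return "".join(sn)
-- ===== SOURCE B (Python) =====
-- def smallestNumber(pattern: str) -> str: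
--     # One forward pass tracking the start of the current descending run;
--     # emit each block's digits directly in descending order (no stack, no index array).
--     parts = []
--     start = 0
--     for k, ch in enumerate(pattern):
--         if ch == 'I':
--             parts.extend(str(v) for v in range(k + 1, start, -1))
--             start = k + 1
--     parts.extend(str(v) for v in range(len(pattern) + 1, start, -1))
--     return "".join(parts)
-- ===== Notes on version B (the rewrite author's own statement) =====
-- stated objective: simpler
-- what changed: Replaces the index stack and the preallocated slot array sn (filled by popping indices and joined at the end) with a single run-start marker: each maximal descending block's numbers are emitted directly as a descending range, so no stack and no positional writes are maintained.
import Mathlib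
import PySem

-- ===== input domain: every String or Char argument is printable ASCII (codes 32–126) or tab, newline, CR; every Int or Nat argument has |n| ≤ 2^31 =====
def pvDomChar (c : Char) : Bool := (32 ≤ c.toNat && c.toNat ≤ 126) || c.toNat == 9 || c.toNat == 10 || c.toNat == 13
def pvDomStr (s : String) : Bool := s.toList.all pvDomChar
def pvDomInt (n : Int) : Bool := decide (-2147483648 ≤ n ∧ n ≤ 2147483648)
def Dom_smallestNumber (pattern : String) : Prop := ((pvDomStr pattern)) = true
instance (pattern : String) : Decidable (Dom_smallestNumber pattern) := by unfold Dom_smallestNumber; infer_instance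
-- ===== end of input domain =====

-- B replaces A's index stack + preallocated slot array with a run-start marker that
-- emits each descending block directly (objective: simpler; return value only, no mutation).

-- ===== PORT A =====
-- the inner 'while stk: sn[stk.pop()] = str(num); num += 1' loop (pop() = pop last;
-- indices pushed are nonnegative positions, so sn[i] = List.set at i.toNat is exact)
def drainA (stk : List Int) (num : Int) (sn : List String) : Int × List String :=
  match h : PySem.List.pop? stk (-1) with
  | none => (num, sn)
  | some r => drainA r.2 (num + 1) (sn.set r.1.toNat (PySem.Int.toStr num))
termination_by stk.length
decreasing_by
  have := PySem.List.length_of_pop?_eq_some stk h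
  omega

-- one iteration of A's 'for idx, ch in enumerate(pattern)' loop; state = (stk, num, sn)
def stepA (st : List Int × Int × List String) (p : Int × Char) : List Int × Int × List String :=
  let stk := st.1 ++ [p.1]
  if p.2 == 'I' then
    let r := drainA stk st.2.1 st.2.2
    (([] : List Int), r.1, r.2)
  else
    (stk, st.2.1, st.2.2)

def smallestNumber (pattern : String) : String :=
  let n := pattern.toList.length
  let st := (PySem.List.enumerate pattern.toList 0).foldl stepA
              (([] : List Int), (1 : Int), List.replicate (n + 1) "")
  let r := drainA (st.1 ++ [(n : Int)]) st.2.1 st.2.2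
  PySem.Str.join "" r.2

-- ===== PORT B =====
-- one iteration of B's loop; state = (parts, start)
def stepB (st : List String × Int) (p : Int × Char) : List String × Int :=
  if p.2 == 'I' then
    (st.1 ++ (PySem.List.pyRange (p.1 + 1) st.2 (-1)).map PySem.Int.toStr, p.1 + 1)
  else
    st

def smallestNumber_alt (pattern : String) : String :=
  let t := (PySem.List.enumerate pattern.toList 0).foldl stepB (([] : List String), (0 : Int))
  PySem.Str.join ""
    (t.1 ++ (PySem.List.pyRange ((pattern.toList.length : Int) + 1) t.2 (-1)).map PySem.Int.toStr)

-- ===== PRECONDITION & SPEC =====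
def Spec_smallestNumber (pattern : String) (out : String) : Prop := out = smallestNumber_alt pattern
instance (pattern : String) (out : String) : Decidable (Spec_smallestNumber pattern out) := by unfold Spec_smallestNumber; infer_instance

-- ===== CLAIM (what is proved, stated in full; the proofs are below) =====
def Claim_equal_smallestNumber : Prop := ∀ (pattern : String), Dom_smallestNumber pattern → Spec_smallestNumber pattern (smallestNumber pattern)

-- ===== LEMMAS AND PROOFS =====

-- countdown range splits off its last element
lemma pyRange_neg_one_snoc (v : Int) (m : Nat) :
    PySem.List.pyRange (v + m) (v - 1) (-1) = PySem.List.pyRange (v + m) v (-1) ++ [v] := by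
  rw [PySem.List.pyRange_neg_one_eq_reverse, PySem.List.pyRange_neg_one_eq_reverse]
  have h : (v - 1) + 1 = v := by ring
  rw [h, PySem.List.pyRange_one_cons (by omega : v < v + (m : Int) + 1)]
  simp

-- draining stack [a, a+c) with counter v writes str(v+c-1) … str(v) into the c blank slots
lemma drainA_spec (c : Nat) : ∀ (a v : Int) (P Q : List String),
    0 ≤ a → P.length = a.toNat →
    drainA (PySem.List.pyRange a (a + c) 1) v (P ++ List.replicate c "" ++ Q) =
      (v + c, P ++ (PySem.List.pyRange (v + c - 1) (v - 1) (-1)).map PySem.Int.toStr ++ Q) := by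
  induction c with
  | zero =>
    intro a v P Q ha hP
    rw [drainA]
    have h0 : a + ((0 : Nat) : Int) = a := by push_cast; ring
    rw [h0, PySem.List.pyRange_one_eq_nil (le_refl a)]
    split
    · norm_num [PySem.List.pyRange_neg_one_eq_nil (le_refl (v - 1))]
    · rename_i r h
      simp [PySem.List.pop?, PySem.List.pyIdx?] at h
  | succ m ih =>
    intro a v P Q ha hP
    have hsplit : PySem.List.pyRange a (a + (m + 1 : Nat)) 1
        = PySem.List.pyRange a (a + m) 1 ++ [a + m] := by
      have : a + ((m : Int) + 1) = (a + m) + 1 := by ring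
      rw [show (((m : Nat) + 1 : Nat) : Int) = (m : Int) + 1 by push_cast; ring, this,
        PySem.List.pyRange_one_succ_right (by omega : a ≤ a + (m : Int))]
    rw [drainA]
    rw [hsplit, PySem.List.pop?_last]
    have hrep : List.replicate (m + 1) "" ++ Q = List.replicate m "" ++ ("" :: Q) := by
      simp [List.replicate_succ']
    have hidx : (a + (m : Int)).toNat = (P ++ List.replicate m "").length := by
      simp [hP]; omega
    have hre : P ++ List.replicate (m + 1) "" ++ Q
        = (P ++ List.replicate m "") ++ ("" :: Q) := by
      rw [List.replicate_succ']; simp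
    have hset : (P ++ List.replicate (m + 1) "" ++ Q).set (a + (m : Int)).toNat
          (PySem.Int.toStr v)
        = P ++ List.replicate m "" ++ (PySem.Int.toStr v :: Q) := by
      rw [hre, hidx, List.set_append_right _ _ (le_refl _)]
      simp
    simp only [hset]
    rw [ih a (v + 1) P (PySem.Int.toStr v :: Q) ha hP]
    rw [Prod.mk.injEq]
    constructor
    · push_cast; ring
    · have h1 : v + 1 + (m : Int) - 1 = v + m := by ring
      have h2 : v + ((m : Nat) + 1 : Nat) - 1 = v + m := by push_cast; ring
      have h3 : v + 1 - 1 = v := by ring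
      rw [h1, h2, h3, pyRange_neg_one_snoc v m]
      simp

-- main loop invariant: A's state (stack [a, s), counter a+1, sn = filled prefix P ++ blanks)
-- and B's state (parts = P, start = a) stay aligned, and the final string lists coincide
lemma loop_spec (xs : List Char) : ∀ (a s : Int) (P : List String),
    0 ≤ a → a ≤ s → P.length = a.toNat →
    (let st := (PySem.List.enumerate xs s).foldl stepA
        (PySem.List.pyRange a s 1, a + 1, P ++ List.replicate ((s - a).toNat + xs.length + 1) "")
     (drainA (st.1 ++ [s + xs.length]) st.2.1 st.2.2).2)
    =
    (let t := (PySem.List.enumerate xs s).foldl stepB (P, a)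
     t.1 ++ (PySem.List.pyRange (s + xs.length + 1) t.2 (-1)).map PySem.Int.toStr) := by
  induction xs with
  | nil =>
    intro a s P ha has hP
    simp only [PySem.List.enumerate_nil, List.foldl_nil, List.length_nil, Nat.cast_zero, add_zero]
    have hstk : PySem.List.pyRange a s 1 ++ [s] = PySem.List.pyRange a (a + ((s - a).toNat + 1 : Nat)) 1 := by
      have : a + (((s - a).toNat + 1 : Nat) : Int) = s + 1 := by push_cast; omega
      rw [this, PySem.List.pyRange_one_succ_right has]
    rw [hstk]
    have := drainA_spec ((s - a).toNat + 1) a (a + 1) P [] ha hP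
    simp only [List.append_nil] at this
    rw [this]
    have h1 : a + 1 + (((s - a).toNat + 1 : Nat) : Int) - 1 = s + 1 := by push_cast; omega
    have h2 : a + 1 - 1 = a := by ring
    rw [h1, h2]
  | cons ch rest ih =>
    intro a s P ha has hP
    simp only [PySem.List.enumerate_cons, List.foldl_cons, List.length_cons]
    by_cases hch : ch = 'I'
    · -- 'I': A drains the stack [a, s+1); B emits the same block
      have hstepA : stepA (PySem.List.pyRange a s 1, a + 1,
            P ++ List.replicate ((s - a).toNat + (rest.length + 1) + 1) "") (s, ch)
          = (([] : List Int), s + 2,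
             (P ++ (PySem.List.pyRange (s + 1) a (-1)).map PySem.Int.toStr)
               ++ List.replicate (rest.length + 1) "") := by
        simp only [stepA, hch, beq_self_eq_true, if_true]
        have hstk : PySem.List.pyRange a s 1 ++ [s]
            = PySem.List.pyRange a (a + ((s - a).toNat + 1 : Nat)) 1 := by
          have : a + (((s - a).toNat + 1 : Nat) : Int) = s + 1 := by push_cast; omega
          rw [this, PySem.List.pyRange_one_succ_right has]
        have hrep : List.replicate ((s - a).toNat + (rest.length + 1) + 1) ""
            = List.replicate ((s - a).toNat + 1) "" ++ List.replicate (rest.length + 1) ("" : String) := by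
          rw [show (s - a).toNat + (rest.length + 1) + 1
                = ((s - a).toNat + 1) + (rest.length + 1) from by omega,
            ← List.replicate_append_replicate]
        simp only [hstk, hrep, ← List.append_assoc]
        rw [drainA_spec ((s - a).toNat + 1) a (a + 1) P _ ha hP]
        have h2 : a + 1 + (((s - a).toNat + 1 : Nat) : Int) - 1 = s + 1 := by push_cast; omega
        have h3 : a + 1 - 1 = a := by ring
        have h1 : a + 1 + (((s - a).toNat + 1 : Nat) : Int) = s + 2 := by push_cast; omega
        rw [h2, h3, h1]
      have hstepB : stepB (P, a) (s, ch)
          = (P ++ (PySem.List.pyRange (s + 1) a (-1)).map PySem.Int.toStr, s + 1) := by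
        simp [stepB, hch]
      rw [hstepA, hstepB]
      have hlenP : (P ++ (PySem.List.pyRange (s + 1) a (-1)).map PySem.Int.toStr).length
          = (s + 1 : Int).toNat := by
        rw [List.length_append, List.length_map, PySem.List.length_pyRange_neg_one, hP]
        omega
      have key := ih (s + 1) (s + 1) (P ++ (PySem.List.pyRange (s + 1) a (-1)).map PySem.Int.toStr)
        (by omega) (le_refl _) hlenP
      simp only [PySem.List.pyRange_one_eq_nil (le_refl ((s : Int) + 1)), sub_self,
        Int.toNat_zero, Nat.zero_add] at key
      have e1 : (s : Int) + 1 + 1 = s + 2 := by ring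
      have e2 : (s : Int) + 1 + (rest.length : Int) = s + ((rest.length : Int) + 1) := by ring
      rw [e1, e2] at key
      have e3 : ((rest.length + 1 : Nat) : Int) = (rest.length : Int) + 1 := by push_cast; ring
      rw [e3]
      exact key
    · -- not 'I': A just pushes the index; B's state is unchanged
      have hstepA : stepA (PySem.List.pyRange a s 1, a + 1,
            P ++ List.replicate ((s - a).toNat + (rest.length + 1) + 1) "") (s, ch)
          = (PySem.List.pyRange a (s + 1) 1, a + 1,
             P ++ List.replicate (((s + 1) - a).toNat + rest.length + 1) "") := by
        simp only [stepA]
        rw [if_neg (by simpa using hch)]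
        rw [PySem.List.pyRange_one_succ_right has]
        have : (s - a).toNat + (rest.length + 1) + 1 = ((s + 1) - a).toNat + rest.length + 1 := by
          omega
        rw [this]
      have hstepB : stepB (P, a) (s, ch) = (P, a) := by
        simp [stepB, hch]
      rw [hstepA, hstepB]
      have key := ih a (s + 1) P ha (by omega) hP
      have e2 : (s : Int) + 1 + (rest.length : Int) = s + ((rest.length : Int) + 1) := by ring
      rw [e2] at key
      have e3 : ((rest.length + 1 : Nat) : Int) = (rest.length : Int) + 1 := by push_cast; ring
      rw [e3]
      exact key

-- ===== VERDICT (by name: the statement is the Claim_ definition above) =====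
theorem smallestNumber_spec : Claim_equal_smallestNumber := by
  intro pattern _
  unfold Spec_smallestNumber smallestNumber smallestNumber_alt
  simp only []
  have h := loop_spec pattern.toList 0 0 [] (le_refl 0) (le_refl 0) rfl
  simp only [PySem.List.pyRange_one_eq_nil (le_refl (0 : Int)), List.nil_append,
    zero_add, zero_sub] at h ⊢
  congr 1
  convert h using 3 <;> simp
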